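-- pv_equiv track=rewrite | github.com/Gurgen99/python_course | files/ex646_656.py | ex648
-- ===== SOURCE A (Python) =====
-- def ex648(a):
--     t = 0
--     for i in range(len(a)):
--         if a[i] == "x":
--             for j in range(i, len(a)):
--                 if a[j] == "0":
--                     t += 1
--     return t
-- ===== SOURCE B (Python) =====
-- def ex648(a):
--     zeros = 0
--     t = 0
--     for c in reversed(a):
--         if c == "0":
--             zeros += 1
--         elif c == "x":
--             t += zeros
--     return t
-- ===== Notes on version B (the rewrite author's own statement) =====
-- stated objective: faster
-- what changed: Replaced the nested scan (for every 'x', rescan the suffix counting '0's) by a single right-to-left pass that keeps a running count of '0's and adds it at each 'x'.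
import Mathlib
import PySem

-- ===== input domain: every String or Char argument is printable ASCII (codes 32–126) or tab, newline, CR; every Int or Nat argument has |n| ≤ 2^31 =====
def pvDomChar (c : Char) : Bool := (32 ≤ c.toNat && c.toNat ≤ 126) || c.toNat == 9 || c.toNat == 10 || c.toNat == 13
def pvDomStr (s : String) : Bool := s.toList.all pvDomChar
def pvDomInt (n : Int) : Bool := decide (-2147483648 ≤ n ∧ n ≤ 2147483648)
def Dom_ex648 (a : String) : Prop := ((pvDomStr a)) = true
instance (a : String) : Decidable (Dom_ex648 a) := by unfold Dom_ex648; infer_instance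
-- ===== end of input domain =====

-- B replaces A's nested rescan of the suffix by one right-to-left pass with a running '0' count (asymptotically faster).

-- ===== PORT A =====
-- inner loop 'for j in range(i, len(a)): if a[j] == "0": t += 1' (range(i,n) = List.range' i (n-i))
def ex648_inner (l : List Char) (i : Nat) (t : Int) : Int :=
  (List.range' i (l.length - i)).foldl
    (fun t j => if l.getD j ' ' = '0' then t + 1 else t) t

def ex648 (a : String) : Int :=
  let l := a.toList
  (List.range l.length).foldl
    (fun t i => if l.getD i ' ' = 'x' then ex648_inner l i t else t) 0

-- ===== PORT B =====
-- single reversed pass: state (zeros seen so far, total)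
def ex648_alt (a : String) : Int :=
  (a.toList.foldr
    (fun c (p : Int × Int) =>
      if c = '0' then (p.1 + 1, p.2)
      else if c = 'x' then (p.1, p.2 + p.1)
      else p)
    (0, 0)).2

-- ===== PRECONDITION & SPEC =====
def Spec_ex648 (a : String) (out : Int) : Prop := out = ex648_alt a
instance (a : String) (out : Int) : Decidable (Spec_ex648 a out) := by unfold Spec_ex648; infer_instance

-- ===== CLAIM (what is proved, stated in full; the proofs are below) =====
def Claim_equal_ex648 : Prop := ∀ (a : String), Dom_ex648 a → Spec_ex648 a (ex648 a)

-- ===== LEMMAS AND PROOFS =====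

-- common specification: for each 'x', count of '0' in the strict suffix
def pvF : List Char → Int
  | [] => 0
  | c :: m => (if c = 'x' then (m.count '0' : Int) else 0) + pvF m

-- shifting the inner loop past a cons
theorem pv_inner_shift (c : Char) (m : List Char) :
    ∀ (k j : Nat) (t : Int), (List.range' (j+1) k).foldl
        (fun t j' => if (c :: m).getD j' ' ' = '0' then t + 1 else t) t
      = (List.range' j k).foldl
        (fun t j' => if m.getD j' ' ' = '0' then t + 1 else t) t := by
  intro k
  induction k with
  | zero => intro j t; simp [List.range']
  | succ k ih =>
    intro j t
    simp only [List.range'_succ, List.foldl_cons, List.getD_cons_succ]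
    exact ih (j+1) _

theorem pv_inner_cons (c : Char) (m : List Char) (j : Nat) (t : Int) :
    ex648_inner (c :: m) (j + 1) t = ex648_inner m j t := by
  unfold ex648_inner
  have hl : (c :: m).length - (j + 1) = m.length - j := by simp
  rw [hl]
  exact pv_inner_shift c m (m.length - j) j t

-- inner loop from 0 counts '0's of the whole list
theorem pv_inner_zero (l : List Char) : ∀ t : Int, ex648_inner l 0 t = t + l.count '0' := by
  induction l with
  | nil => intro t; simp [ex648_inner]
  | cons c m ih =>
    intro t
    unfold ex648_inner
    simp only [List.length_cons, Nat.sub_zero] at *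
    rw [List.range'_succ, List.foldl_cons]
    simp only [List.getD_cons_zero]
    rw [pv_inner_shift c m m.length 0]
    by_cases hc : c = '0'
    · subst hc
      have h2 := ih (t + 1)
      unfold ex648_inner at h2
      simp only [Nat.sub_zero] at h2
      rw [if_pos rfl, h2, List.count_cons]
      simp; ring
    · have h2 := ih t
      unfold ex648_inner at h2
      simp only [Nat.sub_zero] at h2
      rw [if_neg hc, h2, List.count_cons]
      simp [hc]

-- outer loop of A computes pvF
theorem pv_A_loop (l : List Char) : ∀ t : Int,
    (List.range l.length).foldl
      (fun t i => if l.getD i ' ' = 'x' then ex648_inner l i t else t) t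
    = t + pvF l := by
  induction l with
  | nil => intro t; simp [pvF]
  | cons c m ih =>
    intro t
    rw [List.length_cons, List.range_succ_eq_map, List.foldl_cons, List.foldl_map]
    have hstep : (fun (t : Int) (i : Nat) =>
        if (c :: m).getD (i+1) ' ' = 'x' then ex648_inner (c :: m) (i+1) t else t)
        = (fun (t : Int) (i : Nat) => if m.getD i ' ' = 'x' then ex648_inner m i t else t) := by
      funext t i
      rw [List.getD_cons_succ, pv_inner_cons]
    simp only [List.getD_cons_zero, Nat.succ_eq_add_one] at *
    rw [hstep, ih]
    by_cases hc : c = 'x'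
    · rw [if_pos hc, pv_inner_zero]
      have : (c :: m).count '0' = m.count '0' := by
        rw [List.count_cons]; simp [hc]
      simp [pvF, hc]; ring
    · rw [if_neg hc]; simp [pvF, hc]

-- B's foldr state is (count of '0', pvF)
theorem pv_B_loop (l : List Char) :
    l.foldr
      (fun c (p : Int × Int) =>
        if c = '0' then (p.1 + 1, p.2)
        else if c = 'x' then (p.1, p.2 + p.1)
        else p)
      (0, 0) = ((l.count '0' : Int), pvF l) := by
  induction l with
  | nil => simp [pvF]
  | cons c m ih =>
    simp only [List.foldr_cons, ih]
    by_cases h0 : c = '0'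
    · subst h0
      simp [pvF]
    · by_cases hx : c = 'x'
      · subst hx
        simp [pvF]
        ring
      · simp [pvF, h0, hx]

-- ===== VERDICT (by name: the statement is the Claim_ definition above) =====
theorem ex648_spec : Claim_equal_ex648 := by
  intro a _
  unfold Spec_ex648 ex648 ex648_alt
  rw [pv_B_loop, pv_A_loop]
  simp
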